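-- pv_equiv track=rewrite | github.com/randreshg/carts | tools/scripts/agents.py | _generate_codex_md
-- ===== SOURCE A (Python) =====
-- from typing import Dict, Iterable, List, Optional, Tuple
--
-- def _generate_codex_md(claude_content: str) -> str:
--     """CLAUDE.md -> CODEX.md (shorter, command-focused)."""
--     lines = claude_content.splitlines()
--     output: List[str] = []
--     skip_section = False
--     for line in lines:
--         if line.startswith("## Pipeline Overview"):
--             skip_section = True
--             continue
--         if skip_section and line.startswith("## "):
--             skip_section = False
--         if skip_section:
--             continue
--         if line.startswith("## Reference Documentation"):
--             skip_section = True
--             continue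
--         if line == "# CARTS - Compiler for Asynchronous Runtime Systems":
--             output.append("# CARTS - Codex Agent Guide")
--             continue
--         output.append(line)
--
--     output.extend(["", "## Skills", "", "Run `carts agents install` to install repo-managed skills into `~/.codex/skills/`.", ""])
--     return "\n".join(output)
-- ===== SOURCE B (Python) =====
-- def _generate_codex_md(claude_content: str) -> str:
--     """CLAUDE.md -> CODEX.md: partition into sections, drop unwanted sections, flatten."""
--     TITLE = "# CARTS - Compiler for Asynchronous Runtime Systems"
--     # partition lines into a preamble + sections, each starting at a '## ' header
--     sections = []
--     current = []
--     for line in claude_content.splitlines():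
--         if line.startswith("## "):
--             sections.append(current)
--             current = [line]
--         else:
--             current.append(line)
--     sections.append(current)
--
--     def dropped(sec):
--         return bool(sec) and (sec[0].startswith("## Pipeline Overview")
--                               or sec[0].startswith("## Reference Documentation"))
--
--     body = ["# CARTS - Codex Agent Guide" if line == TITLE else line
--             for sec in sections if not dropped(sec)
--             for line in sec]
--     footer = ["", "## Skills", "",
--               "Run `carts agents install` to install repo-managed skills into `~/.codex/skills/`.", ""]
--     return "\n".join(body + footer)
-- ===== Notes on version B (the rewrite author's own statement) =====
-- stated objective: alternative
-- what changed: Replaced A's stateful skip-flag scan with a structural pass: partition the lines into a preamble plus header-delimited sections, filter out the unwanted sections, and flatten the kept ones (title rewritten) before joining.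
import Mathlib
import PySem

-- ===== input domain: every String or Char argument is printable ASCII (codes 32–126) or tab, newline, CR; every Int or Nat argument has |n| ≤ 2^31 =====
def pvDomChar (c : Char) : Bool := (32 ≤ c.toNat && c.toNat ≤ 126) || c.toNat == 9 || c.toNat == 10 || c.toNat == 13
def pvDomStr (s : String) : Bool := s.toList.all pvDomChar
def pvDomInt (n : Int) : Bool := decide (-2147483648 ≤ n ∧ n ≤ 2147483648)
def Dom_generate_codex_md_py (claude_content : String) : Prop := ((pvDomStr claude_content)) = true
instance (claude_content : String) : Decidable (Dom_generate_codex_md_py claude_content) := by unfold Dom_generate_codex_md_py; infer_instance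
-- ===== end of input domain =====

-- B restructures A's skip-flag scan as partition-into-sections, filter, flatten (objective: alternative decomposition, same cost).

def pvTitle : String := "# CARTS - Compiler for Asynchronous Runtime Systems"

def pvFooter : List String :=
  ["", "## Skills", "", "Run `carts agents install` to install repo-managed skills into `~/.codex/skills/`.", ""]

-- ===== PORT A =====
-- A's for-loop over lines, state = (output so far, skip_section flag)
def pvStepA (st : List String × Bool) (line : String) : List String × Bool :=
  if PySem.Str.startswith line "## Pipeline Overview" then (st.1, true)
  else
    let skip := if st.2 && PySem.Str.startswith line "## " then false else st.2
    if skip then (st.1, skip)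
    else if PySem.Str.startswith line "## Reference Documentation" then (st.1, true)
    else if line = pvTitle then (st.1 ++ ["# CARTS - Codex Agent Guide"], skip)
    else (st.1 ++ [line], skip)

def generate_codex_md_py (claude_content : String) : String :=
  let lines := PySem.Str.splitlines claude_content
  let st := lines.foldl pvStepA ([], false)
  PySem.Str.join "\n" (st.1 ++ pvFooter)

-- ===== PORT B =====
def pvDropSec (sec : List String) : Bool :=
  match sec with
  | [] => false
  | h :: _ => PySem.Str.startswith h "## Pipeline Overview" || PySem.Str.startswith h "## Reference Documentation"

-- B's partition loop, state = (finished sections, current section)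
def pvSectStep (st : List (List String) × List String) (line : String) : List (List String) × List String :=
  if PySem.Str.startswith line "## " then (st.1 ++ [st.2], [line]) else (st.1, st.2 ++ [line])

def pvRepl (line : String) : String :=
  if line = pvTitle then "# CARTS - Codex Agent Guide" else line

def generate_codex_md_py_alt (claude_content : String) : String :=
  let st := (PySem.Str.splitlines claude_content).foldl pvSectStep ([], [])
  let sections := st.1 ++ [st.2]
  let body := (sections.filter (fun s => !pvDropSec s)).flatMap (fun s => s.map pvRepl)
  PySem.Str.join "\n" (body ++ pvFooter)

-- ===== PRECONDITION & SPEC =====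
def Spec_generate_codex_md_py (claude_content : String) (out : String) : Prop := out = generate_codex_md_py_alt claude_content
instance (claude_content : String) (out : String) : Decidable (Spec_generate_codex_md_py claude_content out) := by unfold Spec_generate_codex_md_py; infer_instance

-- ===== CLAIM (what is proved, stated in full; the proofs are below) =====
def Claim_equal_generate_codex_md_py : Prop := ∀ (claude_content : String), Dom_generate_codex_md_py claude_content → Spec_generate_codex_md_py claude_content (generate_codex_md_py claude_content)

-- ===== LEMMAS AND PROOFS =====

def pvEmit (ss : List (List String)) : List String :=
  (ss.filter (fun s => !pvDropSec s)).flatMap (fun s => s.map pvRepl)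

def pvCond (cur : List String) : List String :=
  if pvDropSec cur then [] else cur.map pvRepl

lemma pvEmit_append_single (ss : List (List String)) (cur : List String) :
    pvEmit (ss ++ [cur]) = pvEmit ss ++ pvCond cur := by
  by_cases h : pvDropSec cur = true <;>
    simp [pvEmit, pvCond, List.filter_append, h]

lemma pv_sw_mono (line p q : String) (hpq : q.toList <+: p.toList)
    (h : PySem.Str.startswith line p = true) : PySem.Str.startswith line q = true := by
  have h' : p.toList <+: line.toList := (PySem.Chars.startswith_iff _ _).mp (by simpa using h)
  simpa using (PySem.Chars.startswith_iff _ _).mpr (hpq.trans h')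

lemma pv_title_not_sw (line : String) (h : PySem.Str.startswith line "## " = true) :
    line ≠ pvTitle := by
  intro heq; subst heq; exact absurd h (by decide)

lemma pv_loop_eq (lines : List String) : ∀ (ss : List (List String)) (cur : List String),
    (lines.foldl pvStepA (pvEmit ss ++ pvCond cur, pvDropSec cur)).1
      = pvEmit ((lines.foldl pvSectStep (ss, cur)).1 ++ [(lines.foldl pvSectStep (ss, cur)).2]) := by
  induction lines with
  | nil => intro ss cur; simp [pvEmit_append_single]
  | cons line rest ih =>
    intro ss cur
    rw [List.foldl_cons, List.foldl_cons]
    by_cases hpo : PySem.Str.startswith line "## Pipeline Overview" = true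
    · have hsw : PySem.Str.startswith line "## " = true :=
        pv_sw_mono line "## Pipeline Overview" "## " (by decide) hpo
      have hd : pvDropSec [line] = true := by
        have h' := hpo; simp at h'; simp [pvDropSec, h']
      have sA : pvStepA (pvEmit ss ++ pvCond cur, pvDropSec cur) line
          = (pvEmit (ss ++ [cur]) ++ pvCond [line], pvDropSec [line]) := by
        have h' := hpo; simp at h'
        simp [pvStepA, h', hd, pvEmit_append_single, pvCond]
      have sB : pvSectStep (ss, cur) line = (ss ++ [cur], [line]) := by
        have h' := hsw; simp at h'; simp [pvSectStep, h']
      rw [sA, sB]; exact ih (ss ++ [cur]) [line]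
    · by_cases hsw : PySem.Str.startswith line "## " = true
      · by_cases hrd : PySem.Str.startswith line "## Reference Documentation" = true
        · have hd : pvDropSec [line] = true := by
            have h' := hrd; simp at h'; simp [pvDropSec, h']
          have sA : pvStepA (pvEmit ss ++ pvCond cur, pvDropSec cur) line
              = (pvEmit (ss ++ [cur]) ++ pvCond [line], pvDropSec [line]) := by
            have hpo' := hpo; simp at hpo'
            have hrd' := hrd; simp at hrd'
            have hsw' := hsw; simp at hsw'
            simp [pvStepA, hpo', hrd', hsw', hd, pvEmit_append_single, pvCond]
          have sB : pvSectStep (ss, cur) line = (ss ++ [cur], [line]) := by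
            have h' := hsw; simp at h'; simp [pvSectStep, h']
          rw [sA, sB]; exact ih (ss ++ [cur]) [line]
        · have hne : line ≠ pvTitle := pv_title_not_sw line hsw
          have hpo' : PySem.Str.startswith line "## Pipeline Overview" = false :=
            Bool.eq_false_iff.mpr hpo
          have hrd' : PySem.Str.startswith line "## Reference Documentation" = false :=
            Bool.eq_false_iff.mpr hrd
          have hd : pvDropSec [line] = false := by
            have a := hpo'; have b := hrd'; simp at a b; simp [pvDropSec, a, b]
          have hc : pvCond [line] = [line] := by simp [pvCond, hd, pvRepl, hne]
          have sA : pvStepA (pvEmit ss ++ pvCond cur, pvDropSec cur) line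
              = (pvEmit (ss ++ [cur]) ++ pvCond [line], pvDropSec [line]) := by
            have a := hpo'; have b := hrd'; have c := hsw; simp at a b c
            simp [pvStepA, a, b, c, hd, hc, hne, pvEmit_append_single]
          have sB : pvSectStep (ss, cur) line = (ss ++ [cur], [line]) := by
            have h' := hsw; simp at h'; simp [pvSectStep, h']
          rw [sA, sB]; exact ih (ss ++ [cur]) [line]
      · have hsw' : PySem.Str.startswith line "## " = false := Bool.eq_false_iff.mpr hsw
        have hpo' : PySem.Str.startswith line "## Pipeline Overview" = false :=
          Bool.eq_false_iff.mpr (fun h =>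
            hsw (pv_sw_mono line "## Pipeline Overview" "## " (by decide) h))
        have hrd' : PySem.Str.startswith line "## Reference Documentation" = false :=
          Bool.eq_false_iff.mpr (fun h =>
            hsw (pv_sw_mono line "## Reference Documentation" "## " (by decide) h))
        have hdrop : pvDropSec (cur ++ [line]) = pvDropSec cur := by
          cases cur with
          | nil =>
            have a := hpo'; have b := hrd'; simp at a b; simp [pvDropSec, a, b]
          | cons h t => simp [pvDropSec]
        have hc : pvCond (cur ++ [line]) = pvCond cur ++ (if pvDropSec cur then [] else [pvRepl line]) := by
          by_cases hcd : pvDropSec cur = true <;> simp [pvCond, hdrop, hcd]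
        have sA : pvStepA (pvEmit ss ++ pvCond cur, pvDropSec cur) line
            = (pvEmit ss ++ pvCond (cur ++ [line]), pvDropSec (cur ++ [line])) := by
          have a := hpo'; have b := hrd'; have c := hsw'; simp at a b c
          by_cases hcd : pvDropSec cur = true
          · simp [pvStepA, a, b, c, hcd, hdrop, hc]
          · have hcd' : pvDropSec cur = false := Bool.eq_false_iff.mpr hcd
            by_cases hti : line = pvTitle
            · subst hti; simp [pvStepA, a, b, c, hcd', hdrop, hc, pvRepl]
            · simp [pvStepA, a, b, c, hcd', hdrop, hc, hti, pvRepl]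
        have sB : pvSectStep (ss, cur) line = (ss, cur ++ [line]) := by
          have c := hsw'; simp at c; simp [pvSectStep, c]
        rw [sA, sB]; exact ih ss (cur ++ [line])

lemma pv_loop_eq0 (lines : List String) :
    (lines.foldl pvStepA ([], false)).1
      = pvEmit ((lines.foldl pvSectStep ([], [])).1 ++ [(lines.foldl pvSectStep ([], [])).2]) := by
  have h := pv_loop_eq lines [] []
  have e1 : (pvEmit [] ++ pvCond [] : List String) = [] := rfl
  have e2 : pvDropSec [] = false := rfl
  rw [e1, e2] at h
  exact h

-- ===== VERDICT (by name: the statement is the Claim_ definition above) =====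
theorem generate_codex_md_py_spec : Claim_equal_generate_codex_md_py := by
  intro cc _
  unfold Spec_generate_codex_md_py generate_codex_md_py generate_codex_md_py_alt
  show PySem.Str.join "\n" ((List.foldl pvStepA ([], false) (PySem.Str.splitlines cc)).1 ++ pvFooter) = _
  rw [pv_loop_eq0, pvEmit_append_single]
  simp only [pvEmit, pvCond, List.flatMap_append]
  by_cases h : pvDropSec (List.foldl pvSectStep ([], []) (PySem.Str.splitlines cc)).2 = true <;>
    simp [h]
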